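-- pv_equiv track=rewrite | github.com/MohamedAliJmal/bac_algo | serie_1_ex_3.py | crypter
-- ===== SOURCE A (Python) =====
-- def crypter(ph):
--     t=ph.split(" ")
--     for i in range(len(t)):
--         aux=""
--         for j in range(len(t[i])):
--             if t[i][j]=="Z":
--                 aux+="A"
--             elif t[i][j]=="z":
--                 aux+="a"
--             else:
--                 aux+=chr((ord(t[i][j])+i+1))
--         t[i]=aux
--
--     ph=" ".join(t)
--     return ph
-- ===== SOURCE B (Python) =====
-- def crypter(ph):
--     out = []
--     word = 0
--     for c in ph:
--         if c == " ":
--             out.append(" ")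
--             word += 1
--         elif c == "Z":
--             out.append("A")
--         elif c == "z":
--             out.append("a")
--         else:
--             out.append(chr(ord(c) + word + 1))
--     return "".join(out)
-- ===== Notes on version B (the rewrite author's own statement) =====
-- stated objective: faster
-- what changed: Replaces the split/per-word-nested-loop/join pipeline with a single pass over the characters that keeps a running word counter incremented at each separator.
import Mathlib
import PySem

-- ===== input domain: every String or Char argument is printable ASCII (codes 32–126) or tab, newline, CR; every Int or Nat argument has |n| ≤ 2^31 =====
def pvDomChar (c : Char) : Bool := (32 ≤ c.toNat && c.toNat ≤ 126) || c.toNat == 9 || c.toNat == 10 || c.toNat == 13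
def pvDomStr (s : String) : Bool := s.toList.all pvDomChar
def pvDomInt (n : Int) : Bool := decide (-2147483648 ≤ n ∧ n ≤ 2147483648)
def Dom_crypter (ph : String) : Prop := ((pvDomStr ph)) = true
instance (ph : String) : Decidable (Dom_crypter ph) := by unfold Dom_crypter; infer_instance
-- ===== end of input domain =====

-- B replaces A's split / per-word nested loops / join with one single pass over the characters
-- keeping a running word counter (same O(n), measured faster by a constant factor).

-- ===== PORT A =====
-- inner loop of A: aux = ""; for j in range(len(t[i])): ... aux += ...
def cryptWord (i : Nat) (w : List Char) : List Char :=
  w.foldl (fun aux c =>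
    aux ++ [if c = 'Z' then 'A' else if c = 'z' then 'a' else Char.ofNat (c.toNat + i + 1)]) []

def crypter (ph : String) : String :=
  let t := PySem.Chars.splitOn ph.toList [' ']
  String.mk (PySem.Chars.join [' ']
    ((List.range t.length).map (fun i => cryptWord i (t.getD i []))))

-- ===== PORT B =====
def crypter_alt (ph : String) : String :=
  String.mk (ph.toList.foldl (fun (st : List Char × Nat) c =>
    if c = ' ' then (st.1 ++ [' '], st.2 + 1)
    else if c = 'Z' then (st.1 ++ ['A'], st.2)
    else if c = 'z' then (st.1 ++ ['a'], st.2)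
    else (st.1 ++ [Char.ofNat (c.toNat + st.2 + 1)], st.2)) ([], 0)).1

-- ===== PRECONDITION & SPEC =====
def Spec_crypter (ph : String) (out : String) : Prop := out = crypter_alt ph
instance (ph : String) (out : String) : Decidable (Spec_crypter ph out) := by unfold Spec_crypter; infer_instance

-- ===== CLAIM (what is proved, stated in full; the proofs are below) =====
def Claim_equal_crypter : Prop := ∀ (ph : String), Dom_crypter ph → Spec_crypter ph (crypter ph)

-- ===== LEMMAS AND PROOFS =====

-- the per-character cipher both programs apply to a character of word number n
def fA (n : Nat) (c : Char) : Char :=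
  if c = 'Z' then 'A' else if c = 'z' then 'a' else Char.ofNat (c.toNat + n + 1)

-- one-pass reference function (pure form of B's fold)
def gPass : Nat → List Char → List Char
  | _, [] => []
  | n, c :: cs => if c = ' ' then ' ' :: gPass (n + 1) cs else fA n c :: gPass n cs

-- structural characterisation of split on a single space: (first word, remaining words)
def splitP : List Char → List Char × List (List Char)
  | [] => ([], [])
  | c :: cs =>
    if c = ' ' then ([], (splitP cs).1 :: (splitP cs).2)
    else (c :: (splitP cs).1, (splitP cs).2)

theorem go_spec (l : List Char) : ∀ (fuel : Nat) (cur : List Char) (acc : List (List Char)),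
    l.length ≤ fuel →
    PySem.Chars.splitOn.go [' '] fuel l cur acc
      = acc.reverse ++ (cur.reverse ++ (splitP l).1) :: (splitP l).2 := by
  induction l with
  | nil =>
    intro fuel cur acc _
    cases fuel <;> simp [PySem.Chars.splitOn.go, splitP]
  | cons c rest ih =>
    intro fuel cur acc h
    cases fuel with
    | zero => simp at h
    | succ f =>
      rw [PySem.Chars.splitOn.go]
      by_cases hc : c = ' '
      · subst hc
        have hpre : [' '].isPrefixOf (' ' :: rest) = true := by simp [List.isPrefixOf]
        simp only [hpre, if_pos]
        simp only [List.length_cons, List.length_nil, List.drop_succ_cons, List.drop_zero]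
        simp only [List.length_cons] at h
        rw [ih f [] (cur.reverse :: acc) (by omega)]
        have hs : splitP (' ' :: rest) = ([], (splitP rest).1 :: (splitP rest).2) := by
          simp [splitP]
        rw [hs]
        simp
      · have hpre : [' '].isPrefixOf (c :: rest) = false := by
          simp [List.isPrefixOf]; exact fun h' => hc h'.symm
        simp only [hpre, Bool.false_eq_true, if_neg, not_false_iff]
        rw [ih f (c :: cur) acc (by simp at h; omega)]
        have hs : splitP (c :: rest) = (c :: (splitP rest).1, (splitP rest).2) := by
          simp [splitP, hc]
        rw [hs]
        simp

theorem splitOn_eq (cs : List Char) :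
    PySem.Chars.splitOn cs [' '] = (splitP cs).1 :: (splitP cs).2 := by
  have := go_spec cs (cs.length + 1) [] [] (by omega)
  simpa [PySem.Chars.splitOn] using this

theorem cryptWord_acc (w : List Char) (i : Nat) : ∀ acc : List Char,
    w.foldl (fun aux c =>
      aux ++ [if c = 'Z' then 'A' else if c = 'z' then 'a' else Char.ofNat (c.toNat + i + 1)]) acc
      = acc ++ w.map (fA i) := by
  induction w with
  | nil => simp
  | cons c cs ih => intro acc; simp [ih, fA]

theorem cryptWord_eq (i : Nat) (w : List Char) : cryptWord i w = w.map (fA i) := by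
  unfold cryptWord
  rw [cryptWord_acc w i []]
  simp

theorem range_map_eq_mapIdx (t : List (List Char)) : ∀ k : Nat,
    (List.range t.length).map (fun i => cryptWord (k + i) (t.getD i []))
      = t.mapIdx (fun i w => w.map (fA (k + i))) := by
  induction t with
  | nil => intro k; simp
  | cons w ws ih =>
    intro k
    rw [List.length_cons, List.range_succ_eq_map, List.mapIdx_cons]
    simp only [List.map_cons, List.map_map]
    have ht : List.mapIdx (fun i w => List.map (fA (k + (i + 1))) w) ws
        = List.mapIdx (fun i w => List.map (fA (k + 1 + i)) w) ws := by
      congr 1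
      funext i w
      congr 2
      omega
    congr 1
    · simpa using cryptWord_eq (k + 0) w
    · rw [ht, ← ih (k + 1)]
      apply List.map_congr_left
      intro i _
      simp only [Function.comp_apply, List.getD_cons_succ]
      congr 1
      omega

theorem join_nil_cons (sep : List Char) (l : List (List Char)) (h : l ≠ []) :
    PySem.Chars.join sep ([] :: l) = sep ++ PySem.Chars.join sep l := by
  cases l with
  | nil => exact absurd rfl h
  | cons q r => rw [PySem.Chars.join_cons_cons]; simp

theorem join_cons_append (sep a p : List Char) (rest : List (List Char)) :
    PySem.Chars.join sep ((a ++ p) :: rest) = a ++ PySem.Chars.join sep (p :: rest) := by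
  cases rest with
  | nil => simp [PySem.Chars.join_singleton]
  | cons q r => simp [PySem.Chars.join_cons_cons, List.append_assoc]

theorem main_lemma (cs : List Char) : ∀ n : Nat,
    PySem.Chars.join [' ']
      (((splitP cs).1 :: (splitP cs).2).mapIdx (fun i w => w.map (fA (n + i))))
      = gPass n cs := by
  induction cs with
  | nil => intro n; simp [splitP, gPass, PySem.Chars.join_singleton]
  | cons c rest ih =>
    intro n
    by_cases hc : c = ' '
    · subst hc
      have hs : splitP (' ' :: rest) = ([], (splitP rest).1 :: (splitP rest).2) := by
        simp [splitP]
      have hg : gPass n (' ' :: rest) = ' ' :: gPass (n + 1) rest := by simp [gPass]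
      rw [hs, hg, List.mapIdx_cons]
      dsimp only
      rw [List.map_nil, join_nil_cons _ _ (by simp [List.mapIdx_cons])]
      have ht : List.mapIdx (fun i (w : List Char) => w.map (fA (n + (i + 1))))
            ((splitP rest).1 :: (splitP rest).2)
          = List.mapIdx (fun i (w : List Char) => w.map (fA (n + 1 + i)))
            ((splitP rest).1 :: (splitP rest).2) := by
        congr 1
        funext i w
        congr 2
        omega
      rw [ht, ih (n + 1)]
      simp
    · have hs : splitP (c :: rest) = (c :: (splitP rest).1, (splitP rest).2) := by
        simp [splitP, hc]
      have hg : gPass n (c :: rest) = fA n c :: gPass n rest := by simp [gPass, hc]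
      rw [hs, hg]
      dsimp only
      simp only [List.mapIdx_cons, List.map_cons]
      have h1 : fA (n + 0) c :: ((splitP rest).1).map (fA (n + 0))
          = [fA n c] ++ ((splitP rest).1).map (fA (n + 0)) := by simp
      rw [h1, join_cons_append]
      rw [show PySem.Chars.join [' ']
            (((splitP rest).1).map (fA (n + 0)) ::
              List.mapIdx (fun i (w : List Char) => w.map (fA (n + (i + 1)))) (splitP rest).2)
          = PySem.Chars.join [' ']
            (List.mapIdx (fun i (w : List Char) => w.map (fA (n + i)))
              ((splitP rest).1 :: (splitP rest).2)) from by simp [List.mapIdx_cons]]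
      rw [ih n]
      simp

theorem foldB (cs : List Char) : ∀ (acc : List Char) (n : Nat),
    (cs.foldl (fun (st : List Char × Nat) c =>
      if c = ' ' then (st.1 ++ [' '], st.2 + 1)
      else if c = 'Z' then (st.1 ++ ['A'], st.2)
      else if c = 'z' then (st.1 ++ ['a'], st.2)
      else (st.1 ++ [Char.ofNat (c.toNat + st.2 + 1)], st.2)) (acc, n)).1
      = acc ++ gPass n cs := by
  induction cs with
  | nil => simp [gPass]
  | cons c rest ih =>
    intro acc n
    by_cases hc : c = ' '
    · subst hc; simp [gPass, ih]
    · by_cases hz : c = 'Z'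
      · subst hz; simp [gPass, fA, ih]
      · by_cases hz2 : c = 'z'
        · subst hz2; simp [gPass, fA, ih, hz]
        · simp [gPass, fA, hc, hz, hz2, ih]

-- ===== VERDICT (by name: the statement is the Claim_ definition above) =====
theorem crypter_spec : Claim_equal_crypter := by
  intro ph _
  unfold Spec_crypter crypter crypter_alt
  rw [foldB ph.toList [] 0]
  simp only [splitOn_eq, List.nil_append]
  congr 1
  have h1 := range_map_eq_mapIdx ((splitP ph.toList).1 :: (splitP ph.toList).2) 0
  simp only [Nat.zero_add] at h1
  have h2 := main_lemma ph.toList 0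
  simp only [Nat.zero_add] at h2
  rw [h1, h2]
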